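-- pv_equiv track=rewrite | github.com/hwanginhanoi/COS40005 | api/views.py | normalise_floor
-- ===== SOURCE A (Python) =====
-- def normalise_floor(floor_str):
--     res = -1
--     if floor_str.isnumeric():
--         res = int(floor_str)
--     else:
--         res = 0
--         floor_split = floor_str.split(' ')
--         for f in floor_split:
--             if f.isnumeric():
--                 res = res + int(f)
--
--     return res
-- ===== SOURCE B (Python) =====
-- def normalise_floor(floor_str):
--     total = 0
--     tok = ''
--     for ch in floor_str:
--         if ch == ' ':
--             if tok.isnumeric():
--                 total += int(tok)
--             tok = ''
--         else:
--             tok = tok + ch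
--     if tok.isnumeric():
--         total += int(tok)
--     return total
-- ===== Notes on version B (the rewrite author's own statement) =====
-- stated objective: alternative
-- what changed: B replaces A's whole-string-numeric fast path plus split(' ')-then-loop with a single character-level pass that builds tokens itself and adds each numeric token as it closes; the -1 dead default and the split disappear.
import Mathlib
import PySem

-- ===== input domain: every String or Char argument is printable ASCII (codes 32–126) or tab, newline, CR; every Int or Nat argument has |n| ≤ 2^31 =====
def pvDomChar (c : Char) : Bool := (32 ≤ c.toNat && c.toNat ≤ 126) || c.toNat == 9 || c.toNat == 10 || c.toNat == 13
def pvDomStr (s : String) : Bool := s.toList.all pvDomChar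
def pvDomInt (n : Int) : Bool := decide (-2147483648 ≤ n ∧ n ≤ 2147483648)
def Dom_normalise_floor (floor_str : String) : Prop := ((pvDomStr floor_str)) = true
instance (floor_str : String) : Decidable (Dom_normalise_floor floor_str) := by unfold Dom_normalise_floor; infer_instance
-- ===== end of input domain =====

-- B replaces A's whole-string-numeric fast path + split(' ')-then-loop by one character-level
-- tokenizing pass (objective: alternative decomposition, same cost).
-- Python's str.isnumeric is ported as PySem strIsdigit — exact on the ASCII domain stated above.

-- ===== PORT A =====
def normalise_floor (floor_str : String) : Int :=
  -- res = -1 is dead in A (both branches overwrite res before the return)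
  if PySem.Str.strIsdigit floor_str then (PySem.Int.ofStr? floor_str).getD 0
  else
    let floor_split := (PySem.Str.split? floor_str " ").getD []
    floor_split.foldl
      (fun res f => if PySem.Str.strIsdigit f then res + (PySem.Int.ofStr? f).getD 0 else res) 0

-- ===== PORT B =====
def normalise_floor_alt (floor_str : String) : Int :=
  let st := floor_str.toList.foldl
    (fun (st : Int × List Char) ch =>
      if ch = ' ' then
        ((if PySem.Chars.strIsdigit st.2 then st.1 + (PySem.Int.ofChars? st.2).getD 0 else st.1), [])
      else (st.1, st.2 ++ [ch]))
    (0, [])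
  if PySem.Chars.strIsdigit st.2 then st.1 + (PySem.Int.ofChars? st.2).getD 0 else st.1

-- ===== PRECONDITION & SPEC =====
def Spec_normalise_floor (floor_str : String) (out : Int) : Prop := out = normalise_floor_alt floor_str
instance (floor_str : String) (out : Int) : Decidable (Spec_normalise_floor floor_str out) := by unfold Spec_normalise_floor; infer_instance

-- ===== CLAIM (what is proved, stated in full; the proofs are below) =====
def Claim_equal_normalise_floor : Prop := ∀ (floor_str : String), Dom_normalise_floor floor_str → Spec_normalise_floor floor_str (normalise_floor floor_str)

-- ===== LEMMAS AND PROOFS =====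

-- the tokens of l split on single spaces, pre being the (in-order) prefix of the open token
def pvTok (pre : List Char) : List Char → List (List Char)
  | [] => [pre]
  | c :: rest => if c = ' ' then pre :: pvTok [] rest else pvTok (pre ++ [c]) rest

-- the contribution of one token to the sum
def pvVal (f : List Char) : Int :=
  if PySem.Chars.strIsdigit f then (PySem.Int.ofChars? f).getD 0 else 0

-- B's final flush
def pvFlush (st : Int × List Char) : Int :=
  if PySem.Chars.strIsdigit st.2 then st.1 + (PySem.Int.ofChars? st.2).getD 0 else st.1

lemma pvGo_eq (l : List Char) : ∀ (fuel : Nat) (cur : List Char) (acc : List (List Char)),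
    l.length < fuel →
    PySem.Chars.splitOn.go [' '] fuel l cur acc = acc.reverse ++ pvTok cur.reverse l := by
  induction l with
  | nil =>
    intro fuel cur acc h
    match fuel with
    | fuel + 1 => simp [PySem.Chars.splitOn.go, pvTok]
  | cons c rest ih =>
    intro fuel cur acc h
    match fuel with
    | fuel + 1 =>
      simp only [PySem.Chars.splitOn.go, List.isPrefixOf, List.length_cons] at *
      by_cases hc : c = ' '
      · subst hc
        simp only [beq_self_eq_true, Bool.true_and, if_true]
        have hdrop : List.drop (([] : List Char).length + 1) (' ' :: rest) = rest := by simp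
        rw [hdrop, ih fuel [] (cur.reverse :: acc) (by omega)]
        simp [pvTok]
      · rw [if_neg (by simp [hc, List.isPrefixOf]; intro h'; exact absurd h'.symm hc)]
        rw [ih fuel (c :: cur) acc (by omega)]
        simp [pvTok, hc]

lemma pvSplit (s : List Char) : PySem.Chars.splitOn s [' '] = pvTok [] s := by
  unfold PySem.Chars.splitOn
  rw [pvGo_eq s (s.length + 1) [] [] (by omega)]
  simp

lemma pvTok_nospace (l : List Char) : ∀ (pre : List Char), (∀ c ∈ l, ¬ c = ' ') →
    pvTok pre l = [pre ++ l] := by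
  induction l with
  | nil => intro pre _; simp [pvTok]
  | cons c rest ih =>
    intro pre h
    rw [pvTok, if_neg (h c (by simp)), ih _ (fun c hc => h c (by simp [hc]))]
    simp

lemma pvFoldA (ts : List (List Char)) (t : Int) :
    ts.foldl (fun res f => if PySem.Chars.strIsdigit f then res + (PySem.Int.ofChars? f).getD 0 else res) t
      = t + ((ts.map pvVal).sum) := by
  have hstep : (fun (res : Int) f => if PySem.Chars.strIsdigit f then res + (PySem.Int.ofChars? f).getD 0 else res)
      = fun res f => res + pvVal f := by
    funext r f; unfold pvVal; split <;> simp
  rw [hstep, PySem.List.foldl_add]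

lemma pvFoldStr (ts : List String) : ∀ (t : Int),
    ts.foldl (fun res f => if PySem.Str.strIsdigit f then res + (PySem.Int.ofStr? f).getD 0 else res) t
      = (ts.map String.toList).foldl
          (fun res f => if PySem.Chars.strIsdigit f then res + (PySem.Int.ofChars? f).getD 0 else res) t := by
  induction ts with
  | nil => intro t; simp
  | cons f rest ih =>
    intro t
    simp only [List.map_cons, List.foldl_cons, PySem.Str.strIsdigit_eq, PySem.Int.ofStr?]
    exact ih _

lemma pvScan (l : List Char) : ∀ (t : Int) (pre : List Char),
    pvFlush (l.foldl
      (fun (st : Int × List Char) ch =>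
        if ch = ' ' then
          ((if PySem.Chars.strIsdigit st.2 then st.1 + (PySem.Int.ofChars? st.2).getD 0 else st.1), [])
        else (st.1, st.2 ++ [ch])) (t, pre))
      = t + ((pvTok pre l).map pvVal).sum := by
  induction l with
  | nil =>
    intro t pre
    show pvFlush (t, pre) = _
    simp only [pvTok, List.map_cons, List.map_nil, List.sum_cons, List.sum_nil, add_zero]
    unfold pvFlush pvVal
    split_ifs <;> ring
  | cons c rest ih =>
    intro t pre
    by_cases hc : c = ' '
    · subst hc
      simp only [List.foldl_cons, if_pos rfl]
      rw [ih]
      have htok : pvTok pre (' ' :: rest) = pre :: pvTok [] rest := by simp [pvTok]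
      rw [htok]
      simp only [List.map_cons, List.sum_cons]
      unfold pvVal
      split_ifs <;> ring
    · simp only [List.foldl_cons, if_neg hc]
      rw [ih]
      simp [pvTok, hc]

lemma pvAlt (s : String) :
    normalise_floor_alt s = ((pvTok [] s.toList).map pvVal).sum := by
  show pvFlush _ = _
  rw [pvScan]
  simp

lemma pvDigit_ne_space {c : Char} (h : PySem.Chars.isdigit c = true) : ¬ c = ' ' := by
  simp [PySem.Chars.isdigit] at h
  rintro rfl
  revert h
  decide

-- ===== VERDICT (by name: the statement is the Claim_ definition above) =====
theorem normalise_floor_spec : Claim_equal_normalise_floor := by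
  intro s _
  unfold Spec_normalise_floor
  rw [pvAlt]
  unfold normalise_floor
  by_cases hd : PySem.Str.strIsdigit s = true
  · rw [if_pos hd]
    rw [PySem.Str.strIsdigit_eq] at hd
    have hall : ∀ c ∈ s.toList, ¬ c = ' ' := by
      intro c hc
      have := hd
      simp only [PySem.Chars.strIsdigit, Bool.and_eq_true, List.all_eq_true] at this
      exact pvDigit_ne_space (this.2 c hc)
    rw [pvTok_nospace s.toList [] hall]
    simp [pvVal, hd, PySem.Int.ofStr?]
  · rw [if_neg hd]
    have hm := PySem.Str.split?_map s " "
    cases h : PySem.Str.split? s " " with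
    | none =>
      rw [h] at hm
      have hsp : (" " : String).toList = [' '] := rfl
      rw [hsp] at hm
      simp [PySem.Chars.split?] at hm
    | some ts =>
      rw [h] at hm
      have hsp : (" " : String).toList = [' '] := rfl
      rw [hsp] at hm
      simp only [Option.map_some, PySem.Chars.split?, List.isEmpty_cons, if_false,
        Bool.false_eq_true, Option.some.injEq] at hm
      simp only [h, Option.getD_some]
      rw [pvFoldStr, hm, pvSplit, pvFoldA]
      simp
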